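-- pv_equiv track=rewrite | github.com/sehagler/nlp_pipeline | development/specimens_lib/manager_lib/specimens_manager_class.py | _trim_documents
-- ===== SOURCE A (Python) =====
-- def _trim_documents(specimen_dict):
--     min_abs_date_diff = {}
--     for process_label in specimen_dict.keys():
--         if process_label not in min_abs_date_diff.keys():
--             min_abs_date_diff[process_label] = None
--     for process_label in specimen_dict.keys():
--         document_list = specimen_dict[process_label]
--         if len(document_list) > 0:
--             if min_abs_date_diff[process_label] is None:
--                 min_abs_date_diff[process_label] = abs(document_list[0][0])
--             for item in document_list:
--                 if abs(item[0]) < min_abs_date_diff[process_label]: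
--                     min_abs_date_diff[process_label] = abs(item[0])
--     document_dict = {}
--     for process_label in specimen_dict.keys():
--         document_list = specimen_dict[process_label]
--         for item in document_list:
--             date_diff = item[0]
--             if abs(date_diff) == min_abs_date_diff[process_label]:
--                 document = item[1]
--                 if process_label not in document_dict.keys():
--                     document_dict[process_label] = {}
--                 if date_diff not in document_dict[process_label]:
--                     document_dict[process_label][date_diff] = []
--                 document_dict[process_label][date_diff].append(document)
--     return document_dict
-- ===== SOURCE B (Python) =====
-- def _trim_documents(specimen_dict):
--     # One pass per label: track the current minimal |date_diff| and the group
--     # of matching documents, resetting the group when a smaller value appears.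
--     result = {}
--     for label, documents in specimen_dict.items():
--         best = None
--         groups = {}
--         for diff, doc in documents:
--             a = abs(diff)
--             if best is None or a < best:
--                 best = a
--                 groups = {diff: [doc]}
--             elif a == best:
--                 groups.setdefault(diff, []).append(doc)
--         if groups:
--             result[label] = groups
--     return result
-- ===== Notes on version B (the rewrite author's own statement) =====
-- stated objective: alternative
-- what changed: Replaces A's three separate passes over the dict (initialise minima to None, compute per-label minimal |date_diff|, then re-scan every list to collect matching documents) by a single loop that, per label, scans its document list once, keeping the current best |date_diff| and the group of matching documents, resetting the group whenever a strictly smaller value appears.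
import Mathlib
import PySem

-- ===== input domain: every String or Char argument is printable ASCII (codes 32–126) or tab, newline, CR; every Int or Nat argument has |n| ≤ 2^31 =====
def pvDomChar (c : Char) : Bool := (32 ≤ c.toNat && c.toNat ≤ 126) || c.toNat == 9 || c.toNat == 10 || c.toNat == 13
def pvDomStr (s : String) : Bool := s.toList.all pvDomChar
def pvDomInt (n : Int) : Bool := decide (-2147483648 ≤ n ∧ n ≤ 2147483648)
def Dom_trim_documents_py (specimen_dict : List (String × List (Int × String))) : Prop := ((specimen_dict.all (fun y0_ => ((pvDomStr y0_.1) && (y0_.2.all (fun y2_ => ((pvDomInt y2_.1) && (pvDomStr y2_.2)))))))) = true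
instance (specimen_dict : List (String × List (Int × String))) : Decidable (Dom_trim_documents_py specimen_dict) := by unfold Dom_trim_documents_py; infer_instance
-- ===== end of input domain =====

-- B replaces A's three dict-keyed passes by ONE pass per label that keeps a running
-- minimal |date_diff| and its group of documents (alternative decomposition, same cost).

-- Python's abs on Int (shared by both ports)
def pvAbs (n : Int) : Int := if n < 0 then -n else n

-- ===== PORT A =====
-- A-side helpers: the bodies of A's loops, named so the folds below read like the Python.
-- 'abs(item[0]) < min_abs_date_diff[label]' where the stored value is an Optional int
def pvLtOpt (a : Int) : Option Int → Bool
  | some b => decide (a < b)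
  | none => false

-- 'if process_label not in min_abs_date_diff.keys(): min_abs_date_diff[process_label] = None'
def aStep1 (m : PySem.Dict String (Option Int)) (k : String) : PySem.Dict String (Option Int) :=
  if m.contains k then m else m.insert k none

-- body of 'for item in document_list:' in A's second pass
def aInner2 (k : String) (m : PySem.Dict String (Option Int)) (it : Int × String) : PySem.Dict String (Option Int) :=
  if pvLtOpt (pvAbs it.1) (m.getD k none) then m.insert k (some (pvAbs it.1)) else m

-- body of A's second 'for process_label in specimen_dict.keys():' pass
def aStep2 (sd : PySem.Dict String (List (Int × String))) (m : PySem.Dict String (Option Int)) (k : String) : PySem.Dict String (Option Int) :=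
  let dl := sd.getD k []
  if 0 < dl.length then
    let m' := if m.getD k none = none then m.insert k (some (pvAbs dl.headI.1)) else m
    dl.foldl (aInner2 k) m'
  else m

-- body of 'for item in document_list:' in A's third pass ('ensure key, ensure date_diff, append')
def aInner3 (mo : Option Int) (k : String) (dd : PySem.Dict String (PySem.Dict Int (List String))) (it : Int × String) : PySem.Dict String (PySem.Dict Int (List String)) :=
  if some (pvAbs it.1) = mo then
    let dd' := if dd.contains k then dd else dd.insert k PySem.Dict.empty
    let inner := dd'.getD k PySem.Dict.empty
    let inner' := if inner.contains it.1 then inner else inner.insert it.1 []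
    dd'.insert k (inner'.modify it.1 [] (fun l => l ++ [it.2]))
  else dd

-- body of A's third 'for process_label in specimen_dict.keys():' pass
def aStep3 (sd : PySem.Dict String (List (Int × String))) (m1 : PySem.Dict String (Option Int)) (dd : PySem.Dict String (PySem.Dict Int (List String))) (k : String) : PySem.Dict String (PySem.Dict Int (List String)) :=
  (sd.getD k []).foldl (aInner3 (m1.getD k none) k) dd

def trim_documents_py (specimen_dict : List (String × List (Int × String))) : List (String × List (Int × List String)) :=
  let sd : PySem.Dict String (List (Int × String)) := PySem.Dict.mk specimen_dict
  let m0 := sd.keys.foldl aStep1 PySem.Dict.empty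
  let m1 := sd.keys.foldl (aStep2 sd) m0
  let dd := sd.keys.foldl (aStep3 sd m1) PySem.Dict.empty
  dd.items.map (fun p => (p.1, p.2.items))

-- ===== PORT B =====
-- B-side helpers: B's single inner loop body ('new best resets the group, tie appends')
def bStep (st : Option Int × PySem.Dict Int (List String)) (it : Int × String) : Option Int × PySem.Dict Int (List String) :=
  let a := pvAbs it.1
  match st.1 with
  | none => (some a, PySem.Dict.empty.insert it.1 [it.2])
  | some b =>
    if a < b then (some a, PySem.Dict.empty.insert it.1 [it.2])
    -- 'groups.setdefault(diff, []).append(doc)' = groups[diff] = groups.get(diff, []) + [doc]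
    else if a = b then (some b, st.2.modify it.1 [] (fun l => l ++ [it.2]))
    else st

-- body of B's 'for label, documents in specimen_dict.items():'
def bOuter (res : PySem.Dict String (List (Int × List String))) (p : String × List (Int × String)) : PySem.Dict String (List (Int × List String)) :=
  let st := p.2.foldl bStep (none, PySem.Dict.empty)
  if 0 < st.2.size then res.insert p.1 st.2.items else res

def trim_documents_py_alt (specimen_dict : List (String × List (Int × String))) : List (String × List (Int × List String)) :=
  (specimen_dict.foldl bOuter PySem.Dict.empty).items

-- ===== PRECONDITION & SPEC =====
-- Pre_ requires pairwise-distinct labels: A's parameter is a Python dict, and an association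
-- list with a duplicate key does not represent any Python dict, so such inputs never reach A.
def Pre_trim_documents_py (specimen_dict : List (String × List (Int × String))) : Prop :=
  (specimen_dict.map (fun p => p.1)).Nodup
instance (specimen_dict : List (String × List (Int × String))) : Decidable (Pre_trim_documents_py specimen_dict) := by unfold Pre_trim_documents_py; infer_instance

def pvWitness_trim_documents_py : (List (String × List (Int × String))) :=
  [("a", [(2, "x"), (-2, "y"), (3, "z")]), ("b", [])]

def Spec_trim_documents_py (specimen_dict : List (String × List (Int × String))) (out : List (String × List (Int × List String))) : Prop := out = trim_documents_py_alt specimen_dict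
instance (specimen_dict : List (String × List (Int × String))) (out : List (String × List (Int × List String))) : Decidable (Spec_trim_documents_py specimen_dict out) := by unfold Spec_trim_documents_py; infer_instance

-- ===== CLAIM (what is proved, stated in full; the proofs are below) =====
def Claim_equal_trim_documents_py : Prop := ∀ (specimen_dict : List (String × List (Int × String))), Dom_trim_documents_py specimen_dict → Pre_trim_documents_py specimen_dict → Spec_trim_documents_py specimen_dict (trim_documents_py specimen_dict)

-- ===== LEMMAS AND PROOFS =====

-- the running minimum of |date_diff| over a document list, started at b
def mfold (b : Int) (dl : List (Int × String)) : Int :=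
  dl.foldl (fun b it => if pvAbs it.1 < b then pvAbs it.1 else b) b

-- A's min_abs_date_diff[label] as a function of the label's document list
def aMinOf : List (Int × String) → Option Int
  | [] => none
  | h :: t => some (mfold (pvAbs h.1) (h :: t))

-- the per-label group: documents whose |date_diff| equals mo, keyed by date_diff
def collectO (mo : Option Int) (dl : List (Int × String)) (G : PySem.Dict Int (List String)) : PySem.Dict Int (List String) :=
  dl.foldl (fun G it => if some (pvAbs it.1) = mo then G.modify it.1 [] (fun l => l ++ [it.2]) else G) G

def noMatch (mo : Option Int) (dl : List (Int × String)) : Bool :=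
  dl.all (fun it => !(some (pvAbs it.1) == mo))

lemma mfold_le (dl : List (Int × String)) : ∀ b, mfold b dl ≤ b := by
  induction dl with
  | nil => intro b; simp [mfold]
  | cons it t ih =>
    intro b
    by_cases h : pvAbs it.1 < b
    · have := ih (pvAbs it.1)
      simp only [mfold, List.foldl_cons, if_pos h] at *
      omega
    · have := ih b
      simp only [mfold, List.foldl_cons, if_neg h] at *
      omega

lemma mfold_mem_or (dl : List (Int × String)) : ∀ b, mfold b dl = b ∨ ∃ it ∈ dl, pvAbs it.1 = mfold b dl := by
  induction dl with
  | nil => intro b; left; rfl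
  | cons it t ih =>
    intro b
    by_cases h : pvAbs it.1 < b
    · right
      have hm : mfold b (it :: t) = mfold (pvAbs it.1) t := by
        simp only [mfold, List.foldl_cons, if_pos h]
      rcases ih (pvAbs it.1) with h1 | ⟨j, hj, he⟩
      · exact ⟨it, List.mem_cons_self, by rw [hm, h1]⟩
      · exact ⟨j, List.mem_cons_of_mem _ hj, by rw [hm, ← he]⟩
    · have hm : mfold b (it :: t) = mfold b t := by
        simp only [mfold, List.foldl_cons, if_neg h]
      rcases ih b with h1 | ⟨j, hj, he⟩
      · left; rw [hm, h1]
      · right; exact ⟨j, List.mem_cons_of_mem _ hj, by rw [hm, ← he]⟩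

lemma pass2_inner_getD_self (k : String) (dl : List (Int × String)) :
    ∀ (m : PySem.Dict String (Option Int)) (b : Int), m.getD k none = some b →
      (dl.foldl (aInner2 k) m).getD k none = some (mfold b dl) := by
  induction dl with
  | nil => intro m b hm; simpa [mfold] using hm
  | cons it t ih =>
    intro m b hm
    rw [List.foldl_cons]
    by_cases h : pvAbs it.1 < b
    · have hstep : aInner2 k m it = m.insert k (some (pvAbs it.1)) := by
        simp [aInner2, hm, pvLtOpt, h]
      rw [hstep]
      have := ih (m.insert k (some (pvAbs it.1))) (pvAbs it.1)
        (PySem.Dict.getD_insert_self _ _ _ _)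
      rw [this]
      simp only [mfold, List.foldl_cons, if_pos h]
    · have hstep : aInner2 k m it = m := by
        simp [aInner2, hm, pvLtOpt, h]
      rw [hstep, ih m b hm]
      simp only [mfold, List.foldl_cons, if_neg h]

lemma pass2_inner_getD_ne (k k' : String) (h : k' ≠ k) (dl : List (Int × String)) :
    ∀ (m : PySem.Dict String (Option Int)), (dl.foldl (aInner2 k) m).getD k' none = m.getD k' none := by
  induction dl with
  | nil => intro m; rfl
  | cons it t ih =>
    intro m
    rw [List.foldl_cons, ih]
    unfold aInner2
    split
    · exact PySem.Dict.getD_insert_of_ne _ _ _ h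
    · rfl

lemma aStep2_getD_self (sd : PySem.Dict String (List (Int × String))) (k : String)
    (m : PySem.Dict String (Option Int)) (h : m.getD k none = none) :
    (aStep2 sd m k).getD k none = aMinOf (sd.getD k []) := by
  unfold aStep2
  cases hdl : sd.getD k [] with
  | nil => simp [h, aMinOf]
  | cons hd tl =>
    simp only [List.length_cons, Nat.zero_lt_succ, if_pos, h]
    rw [pass2_inner_getD_self k _ _ (pvAbs (hd :: tl).headI.1)
      (PySem.Dict.getD_insert_self _ _ _ _)]
    simp [aMinOf, List.headI]

lemma aStep2_getD_ne (sd : PySem.Dict String (List (Int × String))) (k k' : String) (h : k' ≠ k)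
    (m : PySem.Dict String (Option Int)) : (aStep2 sd m k).getD k' none = m.getD k' none := by
  unfold aStep2
  cases hdl : sd.getD k [] with
  | nil => simp
  | cons hd tl =>
    simp only [List.length_cons, Nat.zero_lt_succ, if_pos]
    rw [pass2_inner_getD_ne k k' h]
    split
    · exact PySem.Dict.getD_insert_of_ne _ _ _ h
    · rfl

lemma pass1_getD (ks : List String) : ∀ (m : PySem.Dict String (Option Int)),
    (∀ j, m.getD j none = none) → ∀ j, (ks.foldl aStep1 m).getD j none = none := by
  induction ks with
  | nil => intro m hm j; exact hm j
  | cons k t ih =>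
    intro m hm j
    rw [List.foldl_cons]
    refine ih _ (fun i => ?_) j
    unfold aStep1
    split
    · exact hm i
    · rw [PySem.Dict.getD_insert]
      split
      · rfl
      · exact hm i

lemma pass2_getD_not_mem (sd : PySem.Dict String (List (Int × String))) (ks : List String) :
    ∀ (m : PySem.Dict String (Option Int)) (k : String), k ∉ ks →
      (ks.foldl (aStep2 sd) m).getD k none = m.getD k none := by
  induction ks with
  | nil => intro m k _; rfl
  | cons k0 t ih =>
    intro m k hk
    rw [List.foldl_cons, ih _ _ (fun h => hk (List.mem_cons_of_mem _ h))]
    exact aStep2_getD_ne sd k0 k (fun h => hk (h ▸ List.mem_cons_self)) m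

lemma pass2_getD (sd : PySem.Dict String (List (Int × String))) (ks : List String) (hnd : ks.Nodup) :
    ∀ (m : PySem.Dict String (Option Int)), (∀ j ∈ ks, m.getD j none = none) →
      ∀ k ∈ ks, (ks.foldl (aStep2 sd) m).getD k none = aMinOf (sd.getD k []) := by
  induction ks with
  | nil => intro m _ k hk; exact absurd hk (List.not_mem_nil)
  | cons k0 t ih =>
    intro m hm k hk
    have hnd' := hnd
    rw [List.nodup_cons] at hnd'
    rw [List.foldl_cons]
    rcases List.mem_cons.mp hk with rfl | hk'
    · rw [pass2_getD_not_mem sd t _ k hnd'.1]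
      exact aStep2_getD_self sd k m (hm k List.mem_cons_self)
    · refine ih hnd'.2 _ (fun j hj => ?_) k hk'
      rw [aStep2_getD_ne sd k0 j (fun h => hnd'.1 (h ▸ hj)) m]
      exact hm j (List.mem_cons_of_mem _ hj)

lemma collectO_cons (mo : Option Int) (it : Int × String) (t : List (Int × String)) (G : PySem.Dict Int (List String)) :
    collectO mo (it :: t) G =
      collectO mo t (if some (pvAbs it.1) = mo then G.modify it.1 [] (fun l => l ++ [it.2]) else G) := rfl

lemma mfold_cons (b : Int) (it : Int × String) (t : List (Int × String)) :
    mfold b (it :: t) = mfold (if pvAbs it.1 < b then pvAbs it.1 else b) t := rfl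

lemma noMatch_cons (mo : Option Int) (it : Int × String) (t : List (Int × String)) :
    noMatch mo (it :: t) = ((!(some (pvAbs it.1) == mo)) && noMatch mo t) := by
  simp [noMatch]

lemma collectO_no_match (mo : Option Int) (dl : List (Int × String)) :
    ∀ G, noMatch mo dl = true → collectO mo dl G = G := by
  induction dl with
  | nil => intro G _; rfl
  | cons it t ih =>
    intro G h
    rw [noMatch_cons, Bool.and_eq_true] at h
    have hne : ¬ (some (pvAbs it.1) = mo) := by simpa using h.1
    rw [collectO_cons, if_neg hne]
    exact ih G h.2

lemma ensure_modify (inner : PySem.Dict Int (List String)) (x : Int) (f : List String → List String) :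
    (if inner.contains x then inner else inner.insert x []).modify x [] f = inner.modify x [] f := by
  by_cases hc : inner.contains x
  · rw [if_pos hc]
  · rw [if_neg hc]
    have hc' : inner.contains x = false := by simpa using hc
    simp only [PySem.Dict.modify, PySem.Dict.getD_insert_self, PySem.Dict.insert_insert_self,
      PySem.Dict.getD_of_not_contains _ _ hc']

lemma pass3_label (k : String) (mo : Option Int) (dl : List (Int × String)) :
    ∀ (dd : PySem.Dict String (PySem.Dict Int (List String))),
      dl.foldl (aInner3 mo k) dd =
        if noMatch mo dl then dd else dd.insert k (collectO mo dl (dd.getD k PySem.Dict.empty)) := by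
  induction dl with
  | nil => intro dd; simp [noMatch]
  | cons it t ih =>
    intro dd
    by_cases hm : some (pvAbs it.1) = mo
    · have hnm : noMatch mo (it :: t) = false := by
        simp [noMatch_cons, hm]
      have hstep : aInner3 mo k dd it =
          dd.insert k ((dd.getD k PySem.Dict.empty).modify it.1 [] (fun l => l ++ [it.2])) := by
        unfold aInner3
        rw [if_pos hm]
        by_cases hc : dd.contains k
        · simp only [if_pos hc, ensure_modify]
        · have hc' : dd.contains k = false := by simpa using hc
          simp only [if_neg hc, PySem.Dict.getD_insert_self, PySem.Dict.insert_insert_self,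
            ensure_modify, PySem.Dict.getD_of_not_contains _ _ hc']
      rw [List.foldl_cons, hstep, ih, hnm]
      simp only [Bool.false_eq_true, if_false]
      rw [collectO_cons, if_pos hm]
      by_cases ht : noMatch mo t
      · rw [if_pos ht, collectO_no_match mo t _ ht]
      · rw [if_neg ht, PySem.Dict.getD_insert_self, PySem.Dict.insert_insert_self]
    · have hnm : noMatch mo (it :: t) = noMatch mo t := by
        simp [noMatch_cons, hm]
      have hstep : aInner3 mo k dd it = dd := by
        unfold aInner3; rw [if_neg hm]
      rw [List.foldl_cons, hstep, ih, hnm, collectO_cons, if_neg hm]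

lemma pass3_fold (sd : PySem.Dict String (List (Int × String))) (m1 : PySem.Dict String (Option Int))
    (ks : List String) : ∀ (dd : PySem.Dict String (PySem.Dict Int (List String))),
      ks.Nodup → (∀ k ∈ ks, dd.contains k = false) →
      (ks.foldl (aStep3 sd m1) dd).items = dd.items ++ ks.filterMap (fun k =>
        if noMatch (m1.getD k none) (sd.getD k []) then none
        else some (k, collectO (m1.getD k none) (sd.getD k []) PySem.Dict.empty)) := by
  induction ks with
  | nil => intro dd _ _; simp
  | cons k0 rest ih =>
    intro dd hnd hfresh
    rw [List.nodup_cons] at hnd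
    rw [List.foldl_cons]
    have hstep3 : aStep3 sd m1 dd k0 = (sd.getD k0 []).foldl (aInner3 (m1.getD k0 none) k0) dd := rfl
    rw [hstep3, pass3_label]
    by_cases hnm : noMatch (m1.getD k0 none) (sd.getD k0 [])
    · rw [if_pos hnm, ih dd hnd.2 (fun k hk => hfresh k (List.mem_cons_of_mem _ hk))]
      simp [hnm]
    · rw [if_neg hnm]
      have hf0 := hfresh k0 List.mem_cons_self
      have hgd : dd.getD k0 PySem.Dict.empty = PySem.Dict.empty :=
        PySem.Dict.getD_of_not_contains _ _ hf0
      rw [hgd]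
      set C := collectO (m1.getD k0 none) (sd.getD k0 []) PySem.Dict.empty with hC
      have hfresh' : ∀ k ∈ rest, (dd.insert k0 C).contains k = false := by
        intro k hk
        rw [PySem.Dict.contains_insert]
        have hne : k ≠ k0 := fun e => hnd.1 (e ▸ hk)
        simp [hne, hfresh k (List.mem_cons_of_mem _ hk)]
      rw [ih _ hnd.2 hfresh', PySem.Dict.items_insert_of_not_contains _ _ hf0]
      simp [hnm, List.append_assoc]
      exact hC

lemma modify_empty (x : Int) (d : String) :
    (PySem.Dict.empty : PySem.Dict Int (List String)).modify x [] (fun l => l ++ [d]) = PySem.Dict.empty.insert x [d] := by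
  simp [PySem.Dict.modify, PySem.Dict.getD_empty]

lemma bStep_some (dl : List (Int × String)) :
    ∀ (b : Int) (G : PySem.Dict Int (List String)),
      dl.foldl bStep (some b, G) =
        (some (mfold b dl),
         if mfold b dl = b then collectO (some b) dl G
         else collectO (some (mfold b dl)) dl PySem.Dict.empty) := by
  induction dl with
  | nil => intro b G; simp [mfold, collectO]
  | cons it t ih =>
    intro b G
    have hmle := mfold_le t (pvAbs it.1)
    have hmleb := mfold_le t b
    rw [List.foldl_cons]
    by_cases h1 : pvAbs it.1 < b
    · have hstep : bStep (some b, G) it = (some (pvAbs it.1), PySem.Dict.empty.insert it.1 [it.2]) := by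
        simp [bStep, h1]
      have hm : mfold b (it :: t) = mfold (pvAbs it.1) t := by
        rw [mfold_cons, if_pos h1]
      rw [hstep, ih, hm, if_neg (by omega : ¬ mfold (pvAbs it.1) t = b)]
      simp only [Prod.mk.injEq, true_and]
      by_cases h2 : mfold (pvAbs it.1) t = pvAbs it.1
      · rw [if_pos h2, collectO_cons, h2, if_pos rfl, modify_empty]
      · have hne : ¬ (some (pvAbs it.1) = some (mfold (pvAbs it.1) t)) :=
          fun h => h2 (Option.some.inj h).symm
        rw [if_neg h2, collectO_cons, if_neg hne]
    · by_cases h2 : pvAbs it.1 = b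
      · have hstep : bStep (some b, G) it = (some b, G.modify it.1 [] (fun l => l ++ [it.2])) := by
          simp [bStep, h2]
        have hm : mfold b (it :: t) = mfold b t := by
          rw [mfold_cons, if_neg h1]
        rw [hstep, ih, hm]
        by_cases h3 : mfold b t = b
        · rw [if_pos h3, if_pos h3]
          simp only [Prod.mk.injEq, true_and]
          rw [collectO_cons, if_pos (by rw [h2] : some (pvAbs it.1) = some b)]
        · have hne : ¬ (some (pvAbs it.1) = some (mfold b t)) :=
            fun h => h3 (by have := Option.some.inj h; omega)
          rw [if_neg h3, if_neg h3]
          simp only [Prod.mk.injEq, true_and]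
          rw [collectO_cons, if_neg hne]
      · have hstep : bStep (some b, G) it = (some b, G) := by
          simp [bStep, h1, h2]
        have hm : mfold b (it :: t) = mfold b t := by
          rw [mfold_cons, if_neg h1]
        rw [hstep, ih, hm]
        by_cases h3 : mfold b t = b
        · have hne : ¬ (some (pvAbs it.1) = some b) :=
            fun h => h2 (Option.some.inj h)
          rw [if_pos h3, if_pos h3]
          simp only [Prod.mk.injEq, true_and]
          rw [collectO_cons, if_neg hne]
        · have hne : ¬ (some (pvAbs it.1) = some (mfold b t)) :=
            fun h => by have := Option.some.inj h; omega
          rw [if_neg h3, if_neg h3]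
          simp only [Prod.mk.injEq, true_and]
          rw [collectO_cons, if_neg hne]

lemma bPair (dl : List (Int × String)) (h : dl ≠ []) :
    dl.foldl bStep (none, PySem.Dict.empty) = (aMinOf dl, collectO (aMinOf dl) dl PySem.Dict.empty) := by
  cases dl with
  | nil => exact absurd rfl h
  | cons hd t =>
    have hstep : bStep (none, PySem.Dict.empty) hd = (some (pvAbs hd.1), PySem.Dict.empty.insert hd.1 [hd.2]) := by
      simp [bStep]
    have hm : aMinOf (hd :: t) = some (mfold (pvAbs hd.1) t) := by
      simp only [aMinOf, mfold_cons, if_neg (lt_irrefl (pvAbs hd.1))]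
    rw [List.foldl_cons, hstep, bStep_some, hm]
    simp only [Prod.mk.injEq, true_and]
    by_cases h2 : mfold (pvAbs hd.1) t = pvAbs hd.1
    · rw [if_pos h2, collectO_cons, h2, if_pos rfl, modify_empty]
    · have hmle := mfold_le t (pvAbs hd.1)
      have hne : ¬ (some (pvAbs hd.1) = some (mfold (pvAbs hd.1) t)) :=
        fun h => h2 (Option.some.inj h).symm
      rw [if_neg h2, collectO_cons, if_neg hne]

lemma collectO_contains_mono (mo : Option Int) (dl : List (Int × String)) (x : Int) :
    ∀ G, G.contains x = true → (collectO mo dl G).contains x = true := by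
  induction dl with
  | nil => intro G h; exact h
  | cons it t ih =>
    intro G h
    rw [collectO_cons]
    by_cases hm : some (pvAbs it.1) = mo
    · rw [if_pos hm]
      refine ih _ ?_
      rw [PySem.Dict.contains_modify]
      simp [h]
    · rw [if_neg hm]; exact ih G h

lemma contains_size_pos (d : PySem.Dict Int (List String)) (x : Int) (h : d.contains x = true) :
    0 < d.size := by
  rcases List.mem_map.mp ((PySem.Dict.contains_iff_mem_keys d x).mp h) with ⟨p, hp, _⟩
  simpa [PySem.Dict.size] using List.length_pos_of_mem hp

lemma collectO_size_pos (mo : Option Int) (dl : List (Int × String)) :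
    ∀ G, (∃ it ∈ dl, some (pvAbs it.1) = mo) → 0 < (collectO mo dl G).size := by
  induction dl with
  | nil => intro G h; rcases h with ⟨it, hit, _⟩; exact absurd hit (List.not_mem_nil)
  | cons it t ih =>
    intro G h
    rw [collectO_cons]
    by_cases hm : some (pvAbs it.1) = mo
    · rw [if_pos hm]
      have hc : (G.modify it.1 [] (fun l => l ++ [it.2])).contains it.1 = true := by
        rw [PySem.Dict.contains_modify]; simp
      exact contains_size_pos _ it.1 (collectO_contains_mono mo t it.1 _ hc)
    · rw [if_neg hm]
      rcases h with ⟨j, hj, hje⟩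
      rcases List.mem_cons.mp hj with rfl | hj'
      · exact absurd hje hm
      · exact ih G ⟨j, hj', hje⟩

lemma noMatch_eq_false (mo : Option Int) (dl : List (Int × String)) :
    noMatch mo dl = false ↔ ∃ it ∈ dl, some (pvAbs it.1) = mo := by
  simp [noMatch, List.all_eq_false]

lemma exists_match_aMinOf (h : Int × String) (t : List (Int × String)) :
    ∃ it ∈ h :: t, some (pvAbs it.1) = aMinOf (h :: t) := by
  rcases mfold_mem_or (h :: t) (pvAbs h.1) with h1 | ⟨j, hj, he⟩
  · exact ⟨h, List.mem_cons_self, by simp [aMinOf, h1]⟩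
  · exact ⟨j, hj, by simp [aMinOf, he]⟩

lemma bOuter_fold (l : List (String × List (Int × String))) :
    ∀ (res : PySem.Dict String (List (Int × List String))),
      (l.map (fun p => p.1)).Nodup → (∀ p ∈ l, res.contains p.1 = false) →
      (l.foldl bOuter res).items = res.items ++ l.filterMap (fun p =>
        let st := p.2.foldl bStep (none, PySem.Dict.empty)
        if 0 < st.2.size then some (p.1, st.2.items) else none) := by
  induction l with
  | nil => intro res _ _; simp
  | cons p rest ih =>
    intro res hnd hfresh
    rw [List.map_cons, List.nodup_cons] at hnd
    rw [List.foldl_cons]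
    by_cases hs : 0 < ((p.2.foldl bStep (none, PySem.Dict.empty)).2).size
    · have hstep : bOuter res p = res.insert p.1 (p.2.foldl bStep (none, PySem.Dict.empty)).2.items := by
        simp [bOuter, hs]
      have hf0 := hfresh p List.mem_cons_self
      have hfresh' : ∀ q ∈ rest, (res.insert p.1 (p.2.foldl bStep (none, PySem.Dict.empty)).2.items).contains q.1 = false := by
        intro q hq
        rw [PySem.Dict.contains_insert]
        have hne : q.1 ≠ p.1 := fun e => hnd.1 (List.mem_map.mpr ⟨q, hq, e⟩)
        simp [hne, hfresh q (List.mem_cons_of_mem _ hq)]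
      rw [hstep, ih _ hnd.2 hfresh', PySem.Dict.items_insert_of_not_contains _ _ hf0]
      simp [hs, List.append_assoc]
    · have hstep : bOuter res p = res := by
        simp [bOuter, hs]
      rw [hstep, ih _ hnd.2 (fun q hq => hfresh q (List.mem_cons_of_mem _ hq))]
      simp [hs]

-- ===== VERDICT (by name: the statement is the Claim_ definition above) =====
theorem trim_documents_py_spec : Claim_equal_trim_documents_py := by
  intro sd0 _hdom hpre
  unfold Pre_trim_documents_py at hpre
  unfold Spec_trim_documents_py
  simp only [trim_documents_py, trim_documents_py_alt]
  have hkeys : (PySem.Dict.mk sd0).keys = sd0.map (fun p => p.1) := rfl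
  have hknd : (PySem.Dict.mk sd0).keys.Nodup := by rw [hkeys]; exact hpre
  have hm0 : ∀ j, (((PySem.Dict.mk sd0).keys.foldl aStep1 PySem.Dict.empty)).getD j none = none :=
    pass1_getD _ _ (fun j => PySem.Dict.getD_empty _ _)
  have hm1 : ∀ k ∈ (PySem.Dict.mk sd0).keys,
      ((PySem.Dict.mk sd0).keys.foldl (aStep2 (PySem.Dict.mk sd0))
        ((PySem.Dict.mk sd0).keys.foldl aStep1 PySem.Dict.empty)).getD k none =
      aMinOf ((PySem.Dict.mk sd0).getD k []) :=
    pass2_getD _ _ hknd _ (fun j _ => hm0 j)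
  rw [pass3_fold _ _ _ PySem.Dict.empty hknd (fun k _ => PySem.Dict.contains_empty k),
      bOuter_fold sd0 PySem.Dict.empty hpre (fun p _ => PySem.Dict.contains_empty p.1)]
  have hempty : (PySem.Dict.empty : PySem.Dict String (PySem.Dict Int (List String))).items = [] := rfl
  have hempty' : (PySem.Dict.empty : PySem.Dict String (List (Int × List String))).items = [] := rfl
  rw [hempty, hempty', List.nil_append, List.nil_append, hkeys, List.map_filterMap,
      List.filterMap_map]
  apply List.filterMap_congr
  intro p hp
  have hmem : p.1 ∈ (PySem.Dict.mk sd0).keys := by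
    rw [hkeys]; exact List.mem_map_of_mem hp
  have hget : (PySem.Dict.mk sd0).getD p.1 [] = p.2 :=
    PySem.Dict.getD_of_mem_items _ hp hknd []
  have hmin := hm1 p.1 hmem
  rw [hget] at hmin
  simp only [Function.comp]
  rw [hkeys] at hmin
  rw [hget, hmin]
  cases hdl : p.2 with
  | nil =>
    have hb : ([] : List (Int × String)).foldl bStep (none, PySem.Dict.empty) =
        ((none : Option Int), (PySem.Dict.empty : PySem.Dict Int (List String))) := rfl
    rw [hb]
    simp [noMatch, aMinOf, PySem.Dict.size]
    rfl
  | cons hd t =>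
    have hex := exists_match_aMinOf hd t
    have hnm : noMatch (aMinOf (hd :: t)) (hd :: t) = false := (noMatch_eq_false _ _).mpr hex
    have hb := bPair (hd :: t) (List.cons_ne_nil hd t)
    have hsz := collectO_size_pos (aMinOf (hd :: t)) (hd :: t) PySem.Dict.empty hex
    rw [hnm, hb]
    simp [hsz]
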